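-- pv_equiv track=rewrite | github.com/HBBFXY/chapter-7-courceconvert-domyself1 | main.py | transform_code
-- ===== SOURCE A (Python) =====
-- import keyword  # 建议使用这个库处理关键字
--
-- reserved_words = set(keyword.kwlist)
--
-- def transform_code(code: str) -> str:
--     result = []
--     word = ""       # 当前累积的单词（变量名/关键字等）
--
--     def process_word(w):
--         """处理一个单词：如果是保留字则保持原样，否则小写字母转大写"""
--         if w in reserved_words:
--             return w
--         else:
--             return "".join(ch.upper() if ch.islower() else ch for ch in w)
--
--     for ch in code:
--         if ch.isalpha() or ch == "_":   # 属于标识符的一部分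
--             word += ch
--         else:
--             # 遇到分隔符，需要处理之前的单词
--             if word:
--                 result.append(process_word(word))
--                 word = ""
--             result.append(ch)   # 非字母字符直接加入结果
--
--     # 结束后可能还剩一个单词
--     if word:
--         result.append(process_word(word))
--
--     return "".join(result)
-- ===== SOURCE B (Python) =====
-- from itertools import groupby
--
-- # Python's keyword.kwlist (the module-level constant A builds reserved_words from)
-- reserved_words = {
--     'False', 'None', 'True', 'and', 'as', 'assert', 'async', 'await', 'break',
--     'class', 'continue', 'def', 'del', 'elif', 'else', 'except', 'finally',
--     'for', 'from', 'global', 'if', 'import', 'in', 'is', 'lambda', 'nonlocal',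
--     'not', 'or', 'pass', 'raise', 'return', 'try', 'while', 'with', 'yield',
-- }
--
--
-- def transform_code(code: str) -> str:
--     def process_word(w):
--         if w in reserved_words:
--             return w
--         return "".join(ch.upper() if ch.islower() else ch for ch in w)
--
--     parts = []
--     for is_ident, grp in groupby(code, key=lambda ch: ch.isalpha() or ch == "_"):
--         seg = "".join(grp)
--         parts.append(process_word(seg) if is_ident else seg)
--     return "".join(parts)
-- ===== Notes on version B (the rewrite author's own statement) =====
-- stated objective: idiomatic
-- what changed: Replaces the manual char-by-char word accumulator and per-char result appends with itertools.groupby over the identifier predicate, processing whole consecutive runs as segments.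
import Mathlib
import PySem

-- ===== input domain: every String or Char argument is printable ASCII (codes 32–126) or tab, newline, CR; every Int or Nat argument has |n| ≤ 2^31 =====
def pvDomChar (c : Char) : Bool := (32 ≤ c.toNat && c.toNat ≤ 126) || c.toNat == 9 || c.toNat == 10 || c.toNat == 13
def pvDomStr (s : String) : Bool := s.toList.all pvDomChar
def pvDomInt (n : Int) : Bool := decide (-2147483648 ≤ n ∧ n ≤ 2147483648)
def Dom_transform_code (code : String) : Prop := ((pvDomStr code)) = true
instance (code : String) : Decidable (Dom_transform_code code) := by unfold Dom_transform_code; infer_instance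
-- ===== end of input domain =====

-- B replaces A's manual char-by-char accumulator with a run-at-a-time grouping (itertools.groupby); same result, objective: idiomatic.

-- Python's keyword.kwlist (shared module constant of both programs)
def tcKwlist : List (List Char) :=
  ["False".toList, "None".toList, "True".toList, "and".toList, "as".toList, "assert".toList,
   "async".toList, "await".toList, "break".toList, "class".toList, "continue".toList,
   "def".toList, "del".toList, "elif".toList, "else".toList, "except".toList, "finally".toList,
   "for".toList, "from".toList, "global".toList, "if".toList, "import".toList, "in".toList,
   "is".toList, "lambda".toList, "nonlocal".toList, "not".toList, "or".toList, "pass".toList,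
   "raise".toList, "return".toList, "try".toList, "while".toList, "with".toList, "yield".toList]

-- process_word, identical inner helper of both programs
def tcProcessWord (w : List Char) : List Char :=
  if tcKwlist.contains w then w
  else w.map (fun ch => if PySem.Chars.islower ch then PySem.Chars.upperChar ch else ch)

-- the identifier-character predicate `ch.isalpha() or ch == "_"` of both programs
def tcIdent (ch : Char) : Bool := PySem.Chars.isalpha ch || ch == '_'

-- ===== PORT A =====
-- A's loop: state = (result segments, current word), appended left to right
def tcGoA : List Char → List (List Char) → List Char → List (List Char)
  | [], res, word => if word ≠ [] then res ++ [tcProcessWord word] else res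
  | ch :: cs, res, word =>
      if tcIdent ch then tcGoA cs res (word ++ [ch])
      else tcGoA cs ((if word ≠ [] then res ++ [tcProcessWord word] else res) ++ [[ch]]) []

def transform_code (code : String) : String :=
  String.ofList (tcGoA code.toList [] []).flatten

-- ===== PORT B =====
-- B's groupby: split off the maximal run with the same key, emit it as one segment
def tcGroups : List Char → List Char
  | [] => []
  | ch :: cs =>
      let k := tcIdent ch
      let seg := ch :: cs.takeWhile (fun d => tcIdent d == k)
      let rest := cs.dropWhile (fun d => tcIdent d == k)
      (if k then tcProcessWord seg else seg) ++ tcGroups rest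
termination_by cs => cs.length
decreasing_by
  have := List.length_dropWhile_le (fun d => tcIdent d == tcIdent ch) cs
  simp only [List.length_cons]
  omega

def transform_code_alt (code : String) : String :=
  String.ofList (tcGroups code.toList)

-- ===== PRECONDITION & SPEC =====
def Spec_transform_code (code : String) (out : String) : Prop := out = transform_code_alt code
instance (code : String) (out : String) : Decidable (Spec_transform_code code out) := by unfold Spec_transform_code; infer_instance

-- ===== CLAIM (what is proved, stated in full; the proofs are below) =====
def Claim_equal_transform_code : Prop := ∀ (code : String), Dom_transform_code code → Spec_transform_code code (transform_code code)

-- ===== LEMMAS AND PROOFS =====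

-- a run of non-identifier chars may be emitted one char at a time
lemma tcGroups_nil : tcGroups [] = [] := by
  rw [tcGroups]

-- a run of non-identifier chars may be emitted one char at a time
lemma tcGroups_false_run (cs : List Char) :
    tcGroups cs = cs.takeWhile (fun d => tcIdent d == false) ++
      tcGroups (cs.dropWhile (fun d => tcIdent d == false)) := by
  cases cs with
  | nil => simp [tcGroups_nil]
  | cons ch cs =>
    by_cases h : tcIdent ch
    · simp [h]
    · simp only [Bool.not_eq_true] at h
      rw [tcGroups]
      simp [h]

-- main invariant of A's loop against B's grouping
lemma tcGoA_eq (cs : List Char) : ∀ (res : List (List Char)) (word : List Char),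
    (∀ c ∈ word, tcIdent c = true) →
    (tcGoA cs res word).flatten =
      res.flatten ++
        (if word = [] then tcGroups cs
         else tcProcessWord (word ++ cs.takeWhile (fun d => tcIdent d == true)) ++
              tcGroups (cs.dropWhile (fun d => tcIdent d == true))) := by
  induction cs with
  | nil =>
    intro res word hw
    by_cases h : word = [] <;> simp [tcGoA, h, tcGroups_nil]
  | cons ch cs ih =>
    intro res word hw
    by_cases h : tcIdent ch
    · rw [tcGoA]
      simp only [h, if_pos]
      rw [ih res (word ++ [ch]) (by intro c hc; rcases List.mem_append.1 hc with hc | hc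
                                    · exact hw c hc
                                    · simp at hc; subst hc; exact h)]
      have hne : word ++ [ch] ≠ [] := by simp
      by_cases hw0 : word = []
      · subst hw0
        rw [tcGroups]
        simp [h]
      · simp [hne, hw0, h]
    · rw [tcGoA]
      simp only [h, Bool.false_eq_true, if_false]
      rw [ih _ [] (by simp)]
      have ht : (ch :: cs).takeWhile (fun d => tcIdent d == true) = [] := by
        simp [h]
      have hd : (ch :: cs).dropWhile (fun d => tcIdent d == true) = ch :: cs := by
        simp [h]
      have hstep : tcGroups (ch :: cs) =
          ch :: (cs.takeWhile (fun d => tcIdent d == false) ++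
            tcGroups (cs.dropWhile (fun d => tcIdent d == false))) := by
        rw [tcGroups]
        simp [h]
      rw [ht, hd, hstep, tcGroups_false_run cs]
      by_cases hw0 : word = []
      · subst hw0
        simp
      · simp [hw0]

-- ===== VERDICT (by name: the statement is the Claim_ definition above) =====
theorem transform_code_spec : Claim_equal_transform_code := by
  intro code _
  unfold Spec_transform_code transform_code transform_code_alt
  rw [tcGoA_eq code.toList [] [] (by simp)]
  simp
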